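-- pv_equiv track=rewrite | github.com/AYoungSn/codingtest_study | lv2/괄호변환.py | solve
-- ===== SOURCE A (Python) =====
-- def check_valance(p):
-- 	# 괄호 갯수가 같은지 체크
-- 	# 앞에서부터 괄호 갯수가 같은 최소 길이로 잘라서
-- 	# 문자열 두개로 분리
-- 	a = 0
-- 	b = 0
-- 	for i in range(len(p)):
-- 		if p[i] == '(':
-- 			a += 1
-- 		else:
-- 			b += 1
-- 		if a == b:
-- 			return p[0:a+b], p[a+b:]
-- 	return p, ""
--
-- def check_correct(p):
-- 	# 괄호가 올바로 매칭되는지 체크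
-- 	# 스택에 넣고 빼고 해서 스택에 최종 남은게 없으면 올바른 괄호
-- 	stackk = []
-- 	for i in p:
-- 		if len(stackk) == 0:
-- 			stackk.append(i)
-- 		else:
-- 			if i == ')' and stackk[len(stackk) - 1] == '(':
-- 				stackk.pop()
-- 			else:
-- 				stackk.append(i)
-- 	if len(stackk) == 0:
-- 		return True
-- 	return False
--
-- def solve(answer, p):
-- 	u, v = check_valance(p)
-- 	# u 문자열이 비어있으면 현재 answer 를 리턴
-- 	if u == "":
-- 		return answer
--
-- 	# u 문자열이 올바른 괄호이면
-- 	if check_correct(u):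
-- 		answer += u # u 를 answer 에 붙이고
-- 		u = v
-- 		return solve(answer, v) # v를 다시 체크
--
-- 	# u 문자열이 올바르지 않으면
-- 	# v 문자열을 올바른지 체크하여 괄호 안에 추가
-- 	res = '(' + solve('', v) + ')'
-- 	# u 문자열은 앞 뒤로 하나씩 떼고 괄호 뒤집기
-- 	u = u[1:len(u) - 1]
-- 	ch = ''
-- 	for i in range(len(u)):
-- 		if u[i] == '(':
-- 			ch += ')'
-- 		else:
-- 			ch += '('
-- 	return answer + res + ch
-- ===== SOURCE B (Python) =====
-- def solve(answer, p):
--     # Index-based recursion over the fixed string p: split points and correctness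
--     # are found with a running balance counter, output pieces are collected in a
--     # list and joined once -- no stack simulation.
--     n = len(p)
--
--     def correct(lo, hi):
--         # p[lo:hi] is a correct parentheses string (only parens, balance never
--         # dips below zero, ends at zero)
--         bal = 0
--         for k in range(lo, hi):
--             c = p[k]
--             if c == '(':
--                 bal += 1
--             elif c == ')':
--                 if bal <= 0:
--                     return False
--                 bal -= 1
--             else:
--                 return False
--         return bal == 0
--
--     def go(lo, parts):
--         while lo < n:
--             bal = 0
--             s = n
--             for j in range(lo, n):
--                 bal += 1 if p[j] == '(' else -1
--                 if bal == 0: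
--                     s = j + 1
--                     break
--             if correct(lo, s):
--                 parts.append(p[lo:s])
--                 lo = s
--             else:
--                 parts.append('(')
--                 go(s, parts)
--                 parts.append(')')
--                 parts.append(''.join(')' if c == '(' else '(' for c in p[lo + 1:s - 1]))
--                 return
--
--     parts = [answer]
--     go(0, parts)
--     return ''.join(parts)
-- ===== Notes on version B (the rewrite author's own statement) =====
-- stated objective: faster
-- what changed: B replaces A's explicit stack simulation of check_correct and per-recursion string slicing/concatenation with index-based recursion over the fixed string: balance counters find the split point and validity, output pieces are collected in a list and joined once.
import Mathlib
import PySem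

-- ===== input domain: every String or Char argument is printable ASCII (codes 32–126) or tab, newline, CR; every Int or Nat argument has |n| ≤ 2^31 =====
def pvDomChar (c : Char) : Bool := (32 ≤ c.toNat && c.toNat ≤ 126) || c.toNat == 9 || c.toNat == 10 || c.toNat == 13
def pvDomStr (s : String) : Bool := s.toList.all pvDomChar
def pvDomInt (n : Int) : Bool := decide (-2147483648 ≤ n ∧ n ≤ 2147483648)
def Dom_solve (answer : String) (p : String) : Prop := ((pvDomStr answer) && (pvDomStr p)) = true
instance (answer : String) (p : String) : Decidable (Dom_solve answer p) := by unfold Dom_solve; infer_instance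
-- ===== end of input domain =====

-- B replaces A's stack simulation and per-recursion string slicing/concatenation with
-- index-based recursion over the fixed string (balance counters, pieces joined once);
-- the return values are proved equal on all inputs.

-- ===== PORT A =====

-- check_valance's loop 'for i in range(len(p))': i is the index, a counts '(' seen,
-- b counts the others; fuel = len(p) - i only makes the loop structural (while fuel > 0
-- exactly while i < len(p), so p.getD i ' ' is p[i]); the slices p[0:a+b] / p[a+b:]
-- are take/drop (nonnegative bounds clamp the same way). a'/b' are the incremented
-- counters, inlined.
def cvLoop (p : List Char) (fuel i a b : Nat) : List Char × List Char :=
  match fuel with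
  | 0 => (p, [])
  | fuel + 1 =>
    if (if p.getD i ' ' = '(' then a + 1 else a) = (if p.getD i ' ' = '(' then b else b + 1) then
      (p.take ((if p.getD i ' ' = '(' then a + 1 else a) + (if p.getD i ' ' = '(' then b else b + 1)),
       p.drop ((if p.getD i ' ' = '(' then a + 1 else a) + (if p.getD i ' ' = '(' then b else b + 1)))
    else cvLoop p fuel (i + 1) (if p.getD i ' ' = '(' then a + 1 else a) (if p.getD i ' ' = '(' then b else b + 1)

-- shape of check_valance's second component (cited by solveCore's termination proof)
theorem cvLoop_snd_shape (p : List Char) :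
    ∀ fuel i a b, (cvLoop p fuel i a b).2 = [] ∨ ∃ k, 1 ≤ k ∧ (cvLoop p fuel i a b).2 = p.drop k := by
  intro fuel
  induction fuel with
  | zero => intro i a b; exact Or.inl rfl
  | succ fuel ih =>
    intro i a b
    rw [cvLoop]
    by_cases hz : (if p.getD i ' ' = '(' then a + 1 else a) = (if p.getD i ' ' = '(' then b else b + 1)
    · rw [if_pos hz]
      exact Or.inr ⟨_, by split <;> omega, rfl⟩
    · rw [if_neg hz]
      exact ih (i + 1) _ _

theorem cvLoop_snd_length (p : List Char) (fuel i a b : Nat) (hp : p ≠ []) :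
    ((cvLoop p fuel i a b).2).length < p.length := by
  rcases cvLoop_snd_shape p fuel i a b with h | ⟨k, hk, h⟩
  · rw [h]; simpa using List.length_pos_iff.mpr hp
  · rw [h, List.length_drop]
    have : 0 < p.length := List.length_pos_iff.mpr hp
    omega

theorem cvLoop_nil (fuel i a b : Nat) : cvLoop ([] : List Char) fuel i a b = ([], []) := by
  induction fuel generalizing i a b with
  | zero => rfl
  | succ fuel ih =>
    rw [cvLoop]
    by_cases hz : (if ([] : List Char).getD i ' ' = '(' then a + 1 else a) =
        (if ([] : List Char).getD i ' ' = '(' then b else b + 1)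
    · rw [if_pos hz]; simp
    · rw [if_neg hz]
      exact ih (i + 1) _ _

-- check_correct: the Python list used as a stack (append/pop at the end) is
-- represented top-at-head; only emptiness of the final stack is observed.
def ccStep (stack : List Char) (c : Char) : List Char :=
  match stack with
  | [] => [c]
  | t :: rest => if c = ')' ∧ t = '(' then rest else c :: t :: rest

def checkCorrect (pl : List Char) : Bool := pl.foldl ccStep [] = []

-- solve: u = check_valance's first part, v its second (inlined); branch order as in A;
-- res and ch ('(' + solve('', v) + ')' and the flip loop, a foldl appending one char
-- per step over the slice u[1:len(u)-1]) are inlined as well.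
def solveCore (answer p : List Char) : List Char :=
  if (cvLoop p p.length 0 0 0).1 = [] then answer
  else if checkCorrect (cvLoop p p.length 0 0 0).1 then
    solveCore (answer ++ (cvLoop p p.length 0 0 0).1) (cvLoop p p.length 0 0 0).2
  else
    answer ++ ('(' :: (solveCore [] (cvLoop p p.length 0 0 0).2 ++ [')'])) ++
      (PySem.List.slice (cvLoop p p.length 0 0 0).1 (some 1)
        (some ((((cvLoop p p.length 0 0 0).1).length : Int) - 1))).foldl
        (fun ch c => ch ++ [if c = '(' then ')' else '(']) []
termination_by p.length
decreasing_by
  all_goals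
    refine cvLoop_snd_length p p.length 0 0 0 fun hp => ?_
    subst hp
    rename_i hne _
    exact hne (by rw [cvLoop_nil])

def solve (answer : String) (p : String) : String :=
  String.ofList (solveCore answer.toList p.toList)

-- ===== PORT B =====

-- correct(lo, hi): running balance over indices k of the fixed p, early False on a
-- dip below zero or a non-parenthesis character; fuel = hi - k makes the
-- 'for k in range(lo, hi)' structural (p.getD k ' ' is p[k] on every step taken)
def altCorrect (p : List Char) (fuel k : Nat) (bal : Int) : Bool :=
  match fuel with
  | 0 => bal == 0
  | fuel + 1 =>
    if p.getD k ' ' = '(' then altCorrect p fuel (k + 1) (bal + 1)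
    else if p.getD k ' ' = ')' then
      if bal ≤ 0 then false else altCorrect p fuel (k + 1) (bal - 1)
    else false

-- the inner 'for j in range(lo, n)' of go: first index after which the running balance
-- is 0, or n if the loop exhausts (fuel = n - j, so the exhausted loop returns j = n)
def altSplit (p : List Char) (fuel j : Nat) (bal : Int) : Nat :=
  match fuel with
  | 0 => j
  | fuel + 1 =>
    if bal + (if p.getD j ' ' = '(' then 1 else -1) = 0 then j + 1
    else altSplit p fuel (j + 1) (bal + (if p.getD j ' ' = '(' then 1 else -1))

-- cited by altGo's termination proof
theorem altSplit_gt (p : List Char) :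
    ∀ fuel j bal, 0 < fuel → j < altSplit p fuel j bal := by
  intro fuel
  induction fuel with
  | zero => intro j bal h; omega
  | succ fuel ih =>
    intro j bal _
    rw [altSplit]
    by_cases hz : bal + (if p.getD j ' ' = '(' then 1 else -1) = 0
    · rw [if_pos hz]; omega
    · rw [if_neg hz]
      match fuel with
      | 0 => exact Nat.lt_succ_self j
      | fuel + 1 => exact Nat.lt_of_succ_lt (ih (j + 1) _ (Nat.succ_pos fuel))

-- go(lo, parts): the while loop is the tail call on s; pieces are collected in acc
-- (joined once at the end); slices of p are take/drop with nonnegative bounds;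
-- s and the flip piece (a generator over p[lo+1:s-1]) are inlined.
def altGo (p : List Char) (lo : Nat) (acc : List (List Char)) : List (List Char) :=
  if _h : lo < p.length then
    let s := altSplit p (p.length - lo) lo 0
    if altCorrect p (s - lo) lo 0 then
      altGo p s (acc ++ [(p.drop lo).take (s - lo)])
    else
      let acc1 := altGo p s (acc ++ [['(']])
      let flips := ((p.drop (lo + 1)).take (s - 1 - (lo + 1))).map
        (fun c => if c = '(' then ')' else '(')
      acc1 ++ [[')'], flips]
  else acc
termination_by p.length - lo
decreasing_by
  · have := altSplit_gt p (p.length - lo) lo 0 (by omega); omega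
  · have := altSplit_gt p (p.length - lo) lo 0 (by omega); omega

def solve_alt (answer : String) (p : String) : String :=
  String.ofList ((altGo p.toList 0 [answer.toList]).flatten)

-- ===== PRECONDITION & SPEC =====
def Spec_solve (answer : String) (p : String) (out : String) : Prop := out = solve_alt answer p
instance (answer : String) (p : String) (out : String) : Decidable (Spec_solve answer p out) := by unfold Spec_solve; infer_instance

-- ===== CLAIM (what is proved, stated in full; the proofs are below) =====
def Claim_equal_solve : Prop := ∀ (answer : String) (p : String), Dom_solve answer p → Spec_solve answer p (solve answer p)

-- ===== LEMMAS AND PROOFS =====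

theorem altSplit_le (p : List Char) :
    ∀ fuel j bal, altSplit p fuel j bal ≤ j + fuel := by
  intro fuel
  induction fuel with
  | zero => intro j bal; simp [altSplit]
  | succ fuel ih =>
    intro j bal
    rw [altSplit]
    by_cases hz : bal + (if p.getD j ' ' = '(' then 1 else -1) = 0
    · rw [if_pos hz]; omega
    · rw [if_neg hz]
      have := ih (j + 1) (bal + (if p.getD j ' ' = '(' then 1 else -1))
      omega

-- the stack check abstracted: an optional count of open parens (none = poisoned)
def cnt : Nat → List Char → Option Nat
  | m, [] => some m
  | m, c :: cs =>
    if c = '(' then cnt (m + 1) cs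
    else if c = ')' then (match m with | 0 => none | m + 1 => cnt m cs)
    else none

theorem ccFold_poison (cs : List Char) (stack : List Char)
    (h : ∃ x ∈ stack, x ≠ '(') : cs.foldl ccStep stack ≠ [] := by
  induction cs generalizing stack with
  | nil =>
    rcases h with ⟨x, hx, _⟩
    simp only [List.foldl_nil]
    rintro rfl; simp at hx
  | cons c cs ih =>
    rcases h with ⟨x, hx, hne⟩
    simp only [List.foldl_cons]
    apply ih
    cases stack with
    | nil => simp at hx
    | cons t rest =>
      rw [show ccStep (t :: rest) c = if c = ')' ∧ t = '(' then rest else c :: t :: rest from rfl]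
      by_cases hcond : c = ')' ∧ t = '('
      · rw [if_pos hcond]
        refine ⟨x, ?_, hne⟩
        rcases List.mem_cons.mp hx with rfl | h2
        · exact absurd hcond.2 hne
        · exact h2
      · rw [if_neg hcond]
        exact ⟨x, List.mem_cons_of_mem c hx, hne⟩

theorem ccFold_rep (cs : List Char) (m : Nat) :
    (cs.foldl ccStep (List.replicate m '(') = []) ↔ cnt m cs = some 0 := by
  induction cs generalizing m with
  | nil => simp [cnt, List.replicate_eq_nil_iff]
  | cons c cs ih =>
    simp only [List.foldl_cons]
    by_cases hc : c = '('
    · subst hc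
      have hstep : ccStep (List.replicate m '(') '(' = List.replicate (m + 1) '(' := by
        cases m with
        | zero => rfl
        | succ m => simp [ccStep, List.replicate_succ]
      rw [hstep, ih (m + 1)]
      simp [cnt]
    · by_cases hc2 : c = ')'
      · subst hc2
        cases m with
        | zero =>
          have hstep : ccStep (List.replicate 0 '(') ')' = [')'] := rfl
          rw [hstep]
          have := ccFold_poison cs [')'] ⟨')', by simp, by decide⟩
          simp [this, cnt]
        | succ m =>
          have hstep : ccStep (List.replicate (m + 1) '(') ')' = List.replicate m '(' := by
            simp [ccStep, List.replicate_succ]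
          rw [hstep, ih m]
          simp [cnt]
      · have hstep : ∃ rest, ccStep (List.replicate m '(') c = c :: rest := by
          cases m with
          | zero => exact ⟨[], rfl⟩
          | succ m =>
            refine ⟨'(' :: List.replicate m '(', ?_⟩
            simp [ccStep, List.replicate_succ, hc2]
        rcases hstep with ⟨rest, hstep⟩
        rw [hstep]
        have := ccFold_poison cs (c :: rest) ⟨c, by simp, hc⟩
        simp [this, cnt, hc, hc2]

theorem checkCorrect_eq (u : List Char) : checkCorrect u = decide (cnt 0 u = some 0) := by
  unfold checkCorrect
  rw [decide_eq_decide]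
  simpa using ccFold_rep u 0

theorem altCorrect_cnt (p : List Char) :
    ∀ fuel k (m : Nat), k + fuel ≤ p.length →
      altCorrect p fuel k (m : Int) = decide (cnt m ((p.drop k).take fuel) = some 0) := by
  intro fuel
  induction fuel with
  | zero =>
    intro k m _
    rw [altCorrect]
    rw [Bool.eq_iff_iff]
    simp only [List.take_zero, cnt, Option.some.injEq, beq_iff_eq, decide_eq_true_eq]
    omega
  | succ fuel ih =>
    intro k m hk
    have hkl : k < p.length := by omega
    rw [altCorrect]
    have hget : p.getD k ' ' = p[k] := List.getD_eq_getElem p ' ' hkl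
    have hsl : (p.drop k).take (fuel + 1) = p[k] :: (p.drop (k + 1)).take fuel := by
      rw [List.drop_eq_getElem_cons hkl, List.take_succ_cons]
    rw [hget, hsl]
    by_cases hc : p[k] = '('
    · rw [if_pos hc]
      have : ((m : Int) + 1) = ((m + 1 : Nat) : Int) := by push_cast; ring
      rw [this, ih (k + 1) (m + 1) (by omega)]
      simp [cnt, hc]
    · rw [if_neg hc]
      by_cases hc2 : p[k] = ')'
      · rw [if_pos hc2]
        cases m with
        | zero => simp [cnt, hc2]
        | succ m =>
          have hle : ¬ ((m + 1 : Nat) : Int) ≤ 0 := by push_cast; omega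
          rw [if_neg hle]
          have : ((m + 1 : Nat) : Int) - 1 = ((m : Nat) : Int) := by push_cast; ring
          rw [this, ih (k + 1) m (by omega)]
          simp [cnt, hc2]
      · rw [if_neg hc2]
        simp [cnt, hc, hc2]

theorem cvLoop_altSplit (p : List Char) (lo : Nat) (hlo : lo ≤ p.length) :
    ∀ (fuel i a b : Nat), fuel = p.length - (lo + i) → a + b = i →
      cvLoop (p.drop lo) fuel i a b =
        ((p.drop lo).take (altSplit p fuel (lo + i) ((a : Int) - (b : Int)) - lo),
         p.drop (altSplit p fuel (lo + i) ((a : Int) - (b : Int)))) := by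
  intro fuel
  induction fuel with
  | zero =>
    intro i a b hd _
    have h1 : lo + i - lo = i := by omega
    rw [cvLoop, altSplit, h1]
    have h2 : (p.drop lo).take i = p.drop lo :=
      List.take_of_length_le (by simp only [List.length_drop]; omega)
    have h3 : p.drop (lo + i) = ([] : List Char) := List.drop_eq_nil_of_le (by omega)
    rw [h2, h3]
  | succ fuel ih =>
    intro i a b hd hab
    have hi2 : lo + i < p.length := by omega
    rw [cvLoop, altSplit]
    have hgd : p.getD (lo + i) ' ' = p[lo + i] := List.getD_eq_getElem p ' ' hi2
    have hgi : (p.drop lo).getD i ' ' = p[lo + i] := by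
      rw [List.getD_eq_getElem (p.drop lo) ' ' (by simp only [List.length_drop]; omega)]
      simp [List.getElem_drop]
    by_cases hc : p[lo + i] = '('
    · simp only [hgd, hgi, hc, if_true]
      by_cases hz : a + 1 = b
      · have hz2 : (a : Int) - (b : Int) + 1 = 0 := by omega
        rw [if_pos hz, if_pos hz2]
        have h1 : a + 1 + b = i + 1 := by omega
        have h2 : lo + i + 1 - lo = i + 1 := by omega
        rw [h1, h2, List.drop_drop, show lo + (i + 1) = lo + i + 1 from by omega]
      · have hz2 : ¬ ((a : Int) - (b : Int) + 1 = 0) := by omega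
        rw [if_neg hz, if_neg hz2]
        have hrec := ih (i + 1) (a + 1) b (by omega) (by omega)
        have e1 : lo + (i + 1) = lo + i + 1 := by omega
        have e2 : ((a + 1 : Nat) : Int) - (b : Int) = (a : Int) - (b : Int) + 1 := by
          push_cast; ring
        rw [e1, e2] at hrec
        exact hrec
    · simp only [hgd, hgi, hc, if_false]
      by_cases hz : a = b + 1
      · have hz2 : (a : Int) - (b : Int) + -1 = 0 := by omega
        rw [if_pos hz, if_pos hz2]
        have h1 : a + (b + 1) = i + 1 := by omega
        have h2 : lo + i + 1 - lo = i + 1 := by omega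
        rw [h1, h2, List.drop_drop, show lo + (i + 1) = lo + i + 1 from by omega]
      · have hz2 : ¬ ((a : Int) - (b : Int) + -1 = 0) := by omega
        rw [if_neg hz, if_neg hz2]
        have hrec := ih (i + 1) a (b + 1) (by omega) (by omega)
        have e1 : lo + (i + 1) = lo + i + 1 := by omega
        have e2 : (a : Int) - ((b + 1 : Nat) : Int) = (a : Int) - (b : Int) + -1 := by
          push_cast; ring
        rw [e1, e2] at hrec
        exact hrec

theorem solveCore_answer (p : List Char) (answer : List Char) :
    solveCore answer p = answer ++ solveCore [] p := by
  induction hn : p.length using Nat.strong_induction_on generalizing p answer with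
  | _ n ih =>
  subst hn
  conv_lhs => rw [solveCore]
  conv_rhs => rw [solveCore]
  by_cases hu : (cvLoop p p.length 0 0 0).1 = []
  · simp [hu]
  · have hp : p ≠ [] := by rintro rfl; exact hu (by rw [cvLoop_nil])
    have hlt := cvLoop_snd_length p p.length 0 0 0 hp
    by_cases hcc : checkCorrect (cvLoop p p.length 0 0 0).1 = true
    · simp only [hu, if_false, hcc, if_true]
      rw [ih _ hlt _ _ rfl, ih _ hlt _ ([] ++ (cvLoop p p.length 0 0 0).1) rfl]
      simp
    · simp only [hu, if_false, hcc]
      simp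

theorem flatten_two (x y : List Char) : ([x, y] : List (List Char)).flatten = x ++ y := by
  simp

theorem altGo_solveCore_aux (p : List Char) :
    ∀ d lo acc, p.length - lo = d →
      (altGo p lo acc).flatten = acc.flatten ++ solveCore [] (p.drop lo) := by
  intro d
  induction d using Nat.strong_induction_on with
  | _ d ih =>
  intro lo acc hd
  by_cases h : lo < p.length
  · have hgt : lo < altSplit p (p.length - lo) lo 0 :=
      altSplit_gt p (p.length - lo) lo 0 (by omega)
    have hle : altSplit p (p.length - lo) lo 0 ≤ p.length := by
      have := altSplit_le p (p.length - lo) lo 0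
      omega
    set s := altSplit p (p.length - lo) lo 0 with hs
    have hcv : cvLoop (p.drop lo) (p.drop lo).length 0 0 0 = ((p.drop lo).take (s - lo), p.drop s) := by
      have := cvLoop_altSplit p lo (by omega) (p.length - lo) 0 0 0 (by omega) rfl
      simp only [Nat.add_zero, Nat.cast_zero, sub_zero] at this
      rw [List.length_drop]
      exact this
    set u := (p.drop lo).take (s - lo) with hu_def
    have hulen : u.length = s - lo := by
      simp only [hu_def, List.length_take, List.length_drop]; omega
    have hu : u ≠ [] := by
      refine List.ne_nil_of_length_pos ?_
      omega
    have hchk : checkCorrect u = altCorrect p (s - lo) lo 0 := by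
      rw [checkCorrect_eq]
      have hac := altCorrect_cnt p (s - lo) lo 0 (by omega)
      simp only [Nat.cast_zero] at hac
      rw [hac]
    rw [altGo]
    simp only [h, dite_true, ← hs]
    rw [solveCore]
    simp only [List.length_drop] at hcv ⊢
    simp only [hcv, hu, if_false, hchk]
    by_cases hc : altCorrect p (s - lo) lo 0 = true
    · simp only [hc, if_true]
      rw [ih (p.length - s) (by omega) s (acc ++ [u]) rfl]
      rw [solveCore_answer (p.drop s) ([] ++ u)]
      simp [List.append_assoc]
    · simp only [hc, Bool.false_eq_true, if_false]
      rw [List.flatten_append, ih (p.length - s) (by omega) s (acc ++ [['(']]) rfl,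
        flatten_two]
      have hslice : PySem.List.slice u (some 1) (some ((u.length : Int) - 1)) =
          (p.drop (lo + 1)).take (s - 1 - (lo + 1)) := by
        have e1 : ((u.length : Int) - 1) = ((s - lo - 1 : Nat) : Int) := by
          rw [hulen]; omega
        have e2 : (1 : Int) = ((1 : Nat) : Int) := by norm_num
        rw [e1, e2, PySem.List.slice_natCast]
        rw [hu_def, List.drop_take, List.drop_drop, List.take_take]
        rw [show lo + 1 = 1 + lo from by omega]
        congr 1
        omega
      rw [hslice, PySem.List.foldl_append_singleton_eq_map]
      simp [List.append_assoc]
  · rw [altGo]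
    simp only [h, dite_false]
    rw [List.drop_eq_nil_of_le (by omega)]
    rw [solveCore]
    simp [cvLoop_nil]

theorem altGo_solveCore (p : List Char) (lo : Nat) (acc : List (List Char)) :
    (altGo p lo acc).flatten = acc.flatten ++ solveCore [] (p.drop lo) := by
  exact altGo_solveCore_aux p (p.length - lo) lo acc rfl

-- ===== VERDICT (by name: the statement is the Claim_ definition above) =====
theorem solve_spec : Claim_equal_solve := by
  intro answer p _
  unfold Spec_solve solve solve_alt
  rw [altGo_solveCore p.toList 0 [answer.toList]]
  simp [← solveCore_answer]
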